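-- pv_equiv track=rewrite | github.com/ryangrg/corner-maze-analysis | scripts/corner-maze-pandas-DREADDs-table.py | reversal_trials_crit
-- ===== SOURCE A (Python) =====
-- def reversal_trials_crit(trial_scores):
--     trial_scores = list(trial_scores)
--     trials_to_crit = 7
--     for i in range(16, 81):
--         perfect_trial_count = trial_scores[i:i+8].count(0)
--         if (perfect_trial_count == 7 and trial_scores[i+7] > 0) or perfect_trial_count == 8:
--             return trials_to_crit
--         elif perfect_trial_count == 7:
--             return trials_to_crit + 1
--         trials_to_crit += 1
--     return 64
-- ===== SOURCE B (Python) =====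
-- def reversal_trials_crit(trial_scores):
--     ts = list(trial_scores)
--     n = len(ts)
--     # prefix table: pref[k] = number of zeros in ts[:k]
--     pref = [0] * (n + 1)
--     for k, v in enumerate(ts):
--         pref[k + 1] = pref[k] + (v == 0)
--     for i in range(16, 81):
--         c = pref[min(i + 8, n)] - pref[min(i, n)]
--         if c == 7:
--             if ts[i + 7] > 0:
--                 return 7 + (i - 16)
--             return 8 + (i - 16)
--         if c == 8:
--             return 7 + (i - 16)
--     return 64
-- ===== Notes on version B (the rewrite author's own statement) =====
-- stated objective: alternative
-- what changed: B builds a one-pass prefix table of zero counts and reads each 8-trial window count as a difference of two table entries, instead of A's re-slicing and re-counting 65 overlapping windows.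
import Mathlib
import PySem

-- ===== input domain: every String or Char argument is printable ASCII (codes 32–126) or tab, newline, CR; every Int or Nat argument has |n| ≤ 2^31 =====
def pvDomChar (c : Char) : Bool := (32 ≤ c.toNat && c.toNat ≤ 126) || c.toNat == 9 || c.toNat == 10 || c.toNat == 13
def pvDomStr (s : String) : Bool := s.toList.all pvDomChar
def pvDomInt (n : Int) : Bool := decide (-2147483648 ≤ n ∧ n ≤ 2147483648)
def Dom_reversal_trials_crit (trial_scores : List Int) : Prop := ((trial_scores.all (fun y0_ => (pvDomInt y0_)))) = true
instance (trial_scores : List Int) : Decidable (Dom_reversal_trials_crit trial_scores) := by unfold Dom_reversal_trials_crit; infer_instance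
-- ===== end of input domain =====

-- B replaces the 65 overlapping slice+count scans by one prefix-count table of zeros (alternative decomposition, same branch logic).

-- ===== PORT A =====
-- the for-loop of A: i runs over range(16, 81), trials_to_crit is the accumulator t
def pvA_loop (ts : List Int) (i : Nat) (t : Int) : Int :=
  if h : i < 81 then
    let c : Int := (PySem.List.count (PySem.List.slice ts (some (i : Int)) (some ((i : Int) + 8))) 0 : Int)
    if (c = 7 ∧ 0 < PySem.List.pyGetD ts ((i : Int) + 7) 0) ∨ c = 8 then t
    else if c = 7 then t + 1
    else pvA_loop ts (i + 1) (t + 1)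
  else 64
termination_by 81 - i

def reversal_trials_crit (trial_scores : List Int) : Int :=
  pvA_loop trial_scores 16 7

-- ===== PORT B =====
-- pref[k] = number of zeros in ts[:k]; built in one pass (B's first loop, as a scan)
def pvPref (ts : List Int) : List Int :=
  ts.scanl (fun p v => p + (if v = 0 then 1 else 0)) 0

-- B's second loop: window count read off the prefix table
def pvB_loop (ts pref : List Int) (n : Nat) (i : Nat) : Int :=
  if h : i < 81 then
    let c : Int := pref.getD (min (i + 8) n) 0 - pref.getD (min i n) 0
    if c = 7 then
      if 0 < PySem.List.pyGetD ts ((i : Int) + 7) 0 then 7 + ((i : Int) - 16)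
      else 8 + ((i : Int) - 16)
    else if c = 8 then 7 + ((i : Int) - 16)
    else pvB_loop ts pref n (i + 1)
  else 64
termination_by 81 - i

def reversal_trials_crit_alt (trial_scores : List Int) : Int :=
  pvB_loop trial_scores (pvPref trial_scores) trial_scores.length 16

-- ===== PRECONDITION & SPEC =====
-- Pre_ excludes exactly the inputs on which A raises IndexError: length-23 lists whose entries
-- from index 16 on are all zero (the only case where the guarded access trial_scores[i+7] runs
-- one past the end); B's literal ts[i+7] access raises there too.
def Pre_reversal_trials_crit (trial_scores : List Int) : Prop :=
  ¬ (trial_scores.length = 23 ∧ (trial_scores.drop 16).all (fun v => v = 0) = true)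
instance (trial_scores : List Int) : Decidable (Pre_reversal_trials_crit trial_scores) := by
  unfold Pre_reversal_trials_crit; infer_instance

def pvWitness_reversal_trials_crit : List Int := [0, 1, 0, 0, 0, 0, 0, 0, 0, 0, 0, 0, 0, 0, 0, 0, 0, 0, 0, 0, 0, 0, 0, 1]

def Spec_reversal_trials_crit (trial_scores : List Int) (out : Int) : Prop := out = reversal_trials_crit_alt trial_scores
instance (trial_scores : List Int) (out : Int) : Decidable (Spec_reversal_trials_crit trial_scores out) := by unfold Spec_reversal_trials_crit; infer_instance

-- ===== CLAIM (what is proved, stated in full; the proofs are below) =====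
def Claim_equal_reversal_trials_crit : Prop := ∀ (trial_scores : List Int), Dom_reversal_trials_crit trial_scores → Pre_reversal_trials_crit trial_scores → Spec_reversal_trials_crit trial_scores (reversal_trials_crit trial_scores)

-- ===== LEMMAS AND PROOFS =====

-- the prefix table reads off zero-counts of prefixes
theorem pvPref_getD (ts : List Int) :
    ∀ (acc : Int) (k : Nat), k ≤ ts.length →
      (ts.scanl (fun p v => p + (if v = 0 then 1 else 0)) acc).getD k 0
        = acc + (PySem.List.count (ts.take k) 0 : Int) := by
  induction ts with
  | nil =>
    intro acc k hk
    have hk0 : k = 0 := Nat.le_zero.mp hk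
    subst hk0
    simp [List.scanl, PySem.List.count]
  | cons a rest ih =>
    intro acc k hk
    cases k with
    | zero => simp [List.scanl, PySem.List.count]
    | succ k =>
      rw [List.scanl_cons, List.getD_cons_succ, List.take_succ_cons]
      rw [ih _ k (by simpa using hk)]
      by_cases ha : a = 0 <;> simp [PySem.List.count, ha] <;> omega

-- the window count of A equals the prefix-table difference of B
theorem pvCount_window (ts : List Int) (i : Nat) :
    (PySem.List.count (PySem.List.slice ts (some (i : Int)) (some ((i : Int) + 8))) 0 : Int)
      = (pvPref ts).getD (min (i + 8) ts.length) 0 - (pvPref ts).getD (min i ts.length) 0 := by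
  have hs : PySem.List.slice ts (some (i : Int)) (some ((i : Int) + 8))
      = (ts.drop i).take 8 := by
    have e1 : ((i : Int) + 8).toNat - ((i : Int)).toNat = 8 := by omega
    rw [PySem.List.slice_toNat ts (by positivity) (by positivity), e1, Int.toNat_natCast]
  rw [hs]
  unfold pvPref
  rw [pvPref_getD ts 0 (min (i + 8) ts.length) (Nat.min_le_right _ _),
      pvPref_getD ts 0 (min i ts.length) (Nat.min_le_right _ _)]
  have h1 : ts.take (min (i + 8) ts.length) = ts.take (i + 8) := by
    rw [List.take_eq_take_iff]; omega
  have h2 : ts.take (min i ts.length) = ts.take i := by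
    rw [List.take_eq_take_iff]; omega
  rw [h1, h2]
  have h3 : ts.take (i + 8) = ts.take i ++ (ts.drop i).take 8 := List.take_add
  rw [h3]
  simp [PySem.List.count]

-- both loops compute the same value (A's accumulator equals 7 + (i - 16))
theorem pvLoop_eq (ts : List Int) :
    ∀ (d i : Nat), 81 ≤ i + d →
      pvA_loop ts i (7 + ((i : Int) - 16)) = pvB_loop ts (pvPref ts) ts.length i := by
  intro d
  induction d with
  | zero =>
    intro i hi
    rw [pvA_loop, pvB_loop]
    rw [dif_neg (by omega), dif_neg (by omega)]
  | succ d ih =>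
    intro i hi
    by_cases h : i < 81
    · rw [pvA_loop, pvB_loop, dif_pos h, dif_pos h]
      simp only []
      rw [← pvCount_window ts i]
      set c : Int := (PySem.List.count (PySem.List.slice ts (some (i : Int)) (some ((i : Int) + 8))) 0 : Int) with hc
      by_cases h7 : c = 7
      · by_cases hg : 0 < PySem.List.pyGetD ts ((i : Int) + 7) 0
        · simp [h7, hg]
        · simp [h7, hg]
          omega
      · by_cases h8 : c = 8
        · simp [h8]
        · simp only [if_neg (show ¬((c = 7 ∧ 0 < PySem.List.pyGetD ts ((i : Int) + 7) 0) ∨ c = 8) by simp [h7, h8]), if_neg h7, if_neg h8]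
          have : (7 : Int) + ((i : Int) - 16) + 1 = 7 + (((i + 1 : Nat) : Int) - 16) := by
            push_cast; ring
          rw [this]
          exact ih (i + 1) (by omega)
    · rw [pvA_loop, pvB_loop, dif_neg h, dif_neg h]

-- ===== VERDICT (by name: the statement is the Claim_ definition above) =====
theorem reversal_trials_crit_spec : Claim_equal_reversal_trials_crit := by
  intro ts _ _
  unfold Spec_reversal_trials_crit reversal_trials_crit reversal_trials_crit_alt
  have := pvLoop_eq ts 65 16 (by omega)
  simpa using this
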